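-- pv_equiv track=rewrite | github.com/MouettE-SC/advent-of-code | 2023/day-13b.py | p
-- ===== SOURCE A (Python) =====
-- def get_cands(line):
--     cand = set()
--     for j in range(1, len(line)):
--         ok = True
--         for c1, c2 in zip(line[0:j][::-1], line[j:]):
--             if c1 != c2:
--                 ok = False
--                 break
--         if ok:
--             cand.add(j)
--     return cand
--
-- def p(lines, f):
--     raw_cands = {}
--     sm_cands = {}
--     for i, l in enumerate(lines):
--         raw_cands[i] = get_cands(l)
--         sm = set()
--         for j in range(0, len(l)):
--             l2 = l[0:j] + ('#' if l[j] == '.' else '.') + l[j+1:]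
--             for c in get_cands(l2):
--                 sm.add(c)
--         sm_cands[i] = sm
--     orig = raw_cands[0].copy()
--     for i in range(1, len(lines)):
--         orig &= raw_cands[i]
--     for i in range(0, len(lines)):
--         r = sm_cands[i]
--         for j in range(0, len(lines)):
--             if j == i:
--                 continue
--             r &= raw_cands[j]
--         r -= orig
--         if r:
--             break
--     if r:
--         return list(r)[0]*f
--     else:
--         return 0
-- ===== SOURCE B (Python) =====
-- def p(lines, f):
--     def refl(lk, j):
--         return 1 <= j < len(lk) and all(c1 == c2 for c1, c2 in zip(lk[:j][::-1], lk[j:]))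
--     for i, li in enumerate(lines):
--         for j in range(1, len(li)):
--             bad = [(c1, c2) for c1, c2 in zip(li[:j][::-1], li[j:]) if c1 != c2]
--             if len(bad) != 1:
--                 continue
--             a, b = bad[0]
--             if ('#' if a == '.' else '.') != b and ('#' if b == '.' else '.') != a:
--                 continue
--             if all(refl(lk, j) for k, lk in enumerate(lines) if k != i):
--                 return j * f
--     return 0
-- ===== Notes on version B (the rewrite author's own statement) =====
-- stated objective: faster
-- what changed: B finds the smudged reflection by counting mismatched pairs per position directly (exactly one fixable '.'/'#' mismatch on one row, perfect reflection on all other rows), instead of A's regenerating a freshly flipped string for every character, recomputing all reflection candidates of each flipped string, and intersecting per-row candidate sets.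
-- outside the precondition, e.g. on p(['###........', '#.#.#...#..'], 1): A returns 8, B returns 1
import Mathlib
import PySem

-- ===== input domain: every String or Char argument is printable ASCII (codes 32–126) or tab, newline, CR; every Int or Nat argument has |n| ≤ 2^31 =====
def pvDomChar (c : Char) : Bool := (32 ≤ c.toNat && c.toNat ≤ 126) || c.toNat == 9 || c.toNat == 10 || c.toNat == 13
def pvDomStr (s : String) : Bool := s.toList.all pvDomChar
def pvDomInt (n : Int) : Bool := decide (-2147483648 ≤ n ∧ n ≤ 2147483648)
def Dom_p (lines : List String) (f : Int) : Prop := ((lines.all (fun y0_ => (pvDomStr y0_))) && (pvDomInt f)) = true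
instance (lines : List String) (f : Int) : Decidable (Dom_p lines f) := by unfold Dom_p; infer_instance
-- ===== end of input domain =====

-- B replaces A's regenerate-every-flipped-string-and-intersect-sets search by a direct
-- count of mismatched pairs per reflection position (asymptotically faster; same values
-- wherever A's accidental set-iteration order cannot matter — see Pre_p).


-- ===== PORT A =====
-- zip(line[0:j][::-1], line[j:])  (the same expression occurs verbatim in both Pythons;
-- [::-1] is ported as .reverse, exact by PySem.List.slice?_none_none_neg_one)
def pairsAt (cs : List Char) (j : Int) : List (Char × Char) :=
  (PySem.List.slice cs (some 0) (some j)).reverse.zip (PySem.List.slice cs (some j) none)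

-- the inner 'for c1, c2 in zip(...): if c1 != c2: ok = False; break' loop
def allEq : List (Char × Char) → Bool
  | [] => true
  | (c1, c2) :: rest => if c1 != c2 then false else allEq rest

def get_cands (cs : List Char) : PySem.Set Int :=
  (PySem.List.pyRange 1 (cs.length : Int) 1).foldl
    (fun cand j => if allEq (pairsAt cs j) then PySem.Set.add cand j else cand)
    PySem.Set.empty

-- l[0:j] + ('#' if l[j] == '.' else '.') + l[j+1:]   (j drawn from range(0, len(l)), so in range)
def flipAt (cs : List Char) (j : Int) : List Char :=
  PySem.List.slice cs (some 0) (some j) ++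
  [if PySem.List.pyGetD cs j ' ' == '.' then '#' else '.'] ++
  PySem.List.slice cs (some (j + 1)) none

-- the sm loop for one line
def smLine (cs : List Char) : PySem.Set Int :=
  (PySem.List.pyRange 0 (cs.length : Int) 1).foldl
    (fun sm j => (get_cands (flipAt cs j)).foldl (fun sm c => PySem.Set.add sm c) sm)
    PySem.Set.empty

-- the 'for i, l in enumerate(lines)' loop filling raw_cands and sm_cands
def buildDicts (lines : List String) :
    PySem.Dict Int (PySem.Set Int) × PySem.Dict Int (PySem.Set Int) :=
  (PySem.List.enumerate lines 0).foldl
    (fun st il => (st.1.insert il.1 (get_cands il.2.toList), st.2.insert il.1 (smLine il.2.toList)))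
    (PySem.Dict.empty, PySem.Dict.empty)

-- orig = raw_cands[0].copy(); for i in range(1, len(lines)): orig &= raw_cands[i]
-- (raw_cands[0] raises KeyError on lines = []; that input is outside Pre_p, getD ∅ stands in)
def origOf (raw : PySem.Dict Int (PySem.Set Int)) (n : Int) : PySem.Set Int :=
  (PySem.List.pyRange 1 n 1).foldl
    (fun o i => PySem.Set.inter o (raw.getD i PySem.Set.empty))
    (raw.getD 0 PySem.Set.empty)

-- the body of one iteration of the search loop: r = sm_cands[i]; for j ≠ i: r &= raw_cands[j]; r -= orig
def rOf (raw smd : PySem.Dict Int (PySem.Set Int)) (n : Int) (orig : PySem.Set Int) (i : Int) :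
    PySem.Set Int :=
  PySem.Set.diff
    ((PySem.List.pyRange 0 n 1).foldl
      (fun r j => if j == i then r else PySem.Set.inter r (raw.getD j PySem.Set.empty))
      (smd.getD i PySem.Set.empty))
    orig

-- for i in range(0, len(lines)): … if r: break   (carries the last r past the loop)
def searchLoop (raw smd : PySem.Dict Int (PySem.Set Int)) (n : Int) (orig : PySem.Set Int) :
    List Int → PySem.Set Int → PySem.Set Int
  | [], r => r
  | i :: rest, _ =>
      let r := rOf raw smd n orig i
      if r.isEmpty then searchLoop raw smd n orig rest r else r

-- list(r)[0] is ported as the head of the set's element list; Python's set-iteration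
-- order is not modelled — exact under Pre_p, which makes every candidate set r a singleton.
def p (lines : List String) (f : Int) : Int :=
  let n : Int := (lines.length : Int)
  let st := buildDicts lines
  let orig := origOf st.1 n
  let r := searchLoop st.1 st.2 n orig (PySem.List.pyRange 0 n 1) PySem.Set.empty
  if r.isEmpty then 0 else r.headD 0 * f

-- ===== PORT B =====
-- refl(lk, j): 1 <= j < len(lk) and all(c1 == c2 for c1, c2 in zip(lk[:j][::-1], lk[j:]))
def reflB (lk : List Char) (j : Int) : Bool :=
  decide (1 ≤ j) && decide (j < (lk.length : Int)) && (pairsAt lk j).all (fun q => q.1 == q.2)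

-- the body of B's j-loop: the chain of 'continue' tests for one candidate position
def bCond (lines : List String) (i : Int) (li : List Char) (j : Int) : Bool :=
  let bad := (pairsAt li j).filter (fun q => q.1 != q.2)
  if bad.length != 1 then false
  else
    let a := (bad.headD (' ', ' ')).1
    let b := (bad.headD (' ', ' ')).2
    if ((if a == '.' then '#' else '.') != b) && ((if b == '.' then '#' else '.') != a) then false
    else (PySem.List.enumerate lines 0).all (fun kl => kl.1 == i || reflB kl.2.toList j)

-- for j in range(1, len(li)): first j passing all tests returns j * f
def bInner (lines : List String) (i : Int) (li : List Char) (f : Int) : List Int → Option Int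
  | [] => none
  | j :: js => if bCond lines i li j then some (j * f) else bInner lines i li f js

-- for i, li in enumerate(lines)
def bOuter (lines : List String) (f : Int) : List (Int × String) → Int
  | [] => 0
  | il :: rest =>
      match bInner lines il.1 il.2.toList f (PySem.List.pyRange 1 (il.2.toList.length : Int) 1) with
      | some v => v
      | none => bOuter lines f rest

def p_alt (lines : List String) (f : Int) : Int :=
  bOuter lines f (PySem.List.enumerate lines 0)

-- ===== PRECONDITION & SPEC =====
-- independent mathematical description of one reflection position (used only by Pre_p)
abbrev eqAt (cs : List Char) (j t : Nat) : Prop := cs.getD (j - 1 - t) ' ' = cs.getD (j + t) ' '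

def winW (cs : List Char) (j : Nat) : Nat := min j (cs.length - j)

abbrev isRefl (cs : List Char) (j : Nat) : Prop :=
  1 ≤ j ∧ j < cs.length ∧ ∀ t < winW cs j, eqAt cs j t

-- indices of mismatched pairs of the reflection at j
def badT (cs : List Char) (j : Nat) : List Nat :=
  (List.range (winW cs j)).filter (fun t => !decide (eqAt cs j t))

abbrev fixPair (a b : Char) : Prop :=
  (if a = '.' then '#' else '.') = b ∨ (if b = '.' then '#' else '.') = a

-- j is a reflection of cs after flipping exactly one character ('.'↔'#' style)
abbrev smOk (cs : List Char) (j : Nat) : Prop :=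
  1 ≤ j ∧ j < cs.length ∧
    ((badT cs j = [] ∧ 2 * j ≠ cs.length) ∨
     ((badT cs j).length = 1 ∧
       fixPair (cs.getD (j - 1 - (badT cs j).headD 0) ' ') (cs.getD (j + (badT cs j).headD 0) ' ')))

-- membership in A's candidate set r for row i: smudge-reflection of row i, perfect
-- reflection of every other row, and not a perfect reflection of all rows
abbrev rCond (lines : List String) (i j : Nat) : Prop :=
  smOk (lines.getD i "").toList j ∧
  (∀ k < lines.length, k ≠ i → isRefl (lines.getD k "").toList j) ∧
  ¬ (∀ k < lines.length, isRefl (lines.getD k "").toList j)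

-- Pre_p excludes lines = [] (A raises KeyError) and inputs where some row's candidate
-- set has two or more elements: there A returns list(r)[0] of a CPython set, an
-- accidental hash-iteration-order choice that no port can be expected to match.
def Pre_p (lines : List String) (f : Int) : Prop :=
  lines ≠ [] ∧ ∀ i < lines.length,
    ((List.range (lines.getD i "").toList.length).filter (fun j => decide (rCond lines i j))).length ≤ 1
instance (lines : List String) (f : Int) : Decidable (Pre_p lines f) := by
  unfold Pre_p; infer_instance

def pvWitness_p : List String × Int := (["#.##.", ".#..#"], 3)

def Spec_p (lines : List String) (f : Int) (out : Int) : Prop := out = p_alt lines f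
instance (lines : List String) (f : Int) (out : Int) : Decidable (Spec_p lines f out) := by
  unfold Spec_p; infer_instance

-- ===== CLAIM (what is proved, stated in full; the proofs are below) =====
def Claim_equal_p : Prop :=
  ∀ (lines : List String) (f : Int), Dom_p lines f → Pre_p lines f → Spec_p lines f (p lines f)

-- ===== LEMMAS AND PROOFS =====

-- the character written by A's flip expression
def flipC (c : Char) : Char := if c = '.' then '#' else '.'

theorem flipC_ne (c : Char) : flipC c ≠ c := by
  unfold flipC; split_ifs with h
  · rw [h]; decide
  · exact fun e => h e.symm

-- the pair of characters compared at offset t of the reflection at j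
def pairF (cs : List Char) (j t : Nat) : Char × Char :=
  (cs.getD (j - 1 - t) ' ', cs.getD (j + t) ' ')

-- Step 1: the zip of the reversed prefix with the suffix, as a map over offsets
theorem pairsAt_natCast (cs : List Char) (j : Nat) :
    pairsAt cs (j : Int) = (List.range (winW cs j)).map (pairF cs j) := by
  have hsl : pairsAt cs (j : Int) = (cs.take j).reverse.zip (cs.drop j) := by
    simp [pairsAt, PySem.List.slice_to_natCast, PySem.List.slice_from_natCast]
  rw [hsl]
  apply List.ext_getElem
  · simp only [List.length_zip, List.length_reverse, List.length_take, List.length_drop,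
      List.length_map, List.length_range, winW]
    omega
  · intro i h1 h2
    have hw : i < winW cs j := by simpa using h2
    have hjL : j < cs.length := by simp only [winW] at hw; omega
    have hiw : i < min j (cs.length - j) := hw
    simp only [List.getElem_zip, List.getElem_map, List.getElem_range, List.getElem_reverse,
      List.length_take, List.getElem_take, List.getElem_drop, pairF]
    have e1 : min j cs.length - 1 - i = j - 1 - i := by omega
    rw [List.getD_eq_getElem _ _ (by omega : j - 1 - i < cs.length),
        List.getD_eq_getElem _ _ (by omega : j + i < cs.length)]
    exact Prod.ext (getElem_congr rfl e1 (by omega)) rfl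

theorem allEq_eq_all (P : List (Char × Char)) : allEq P = P.all (fun q => q.1 == q.2) := by
  induction P with
  | nil => rfl
  | cons q rest ih =>
    obtain ⟨a, b⟩ := q
    by_cases h : a = b <;> simp [allEq, h, ih]

theorem allEq_pairs_iff (cs : List Char) (j : Nat) :
    allEq (pairsAt cs (j : Int)) = true ↔ ∀ t < winW cs j, eqAt cs j t := by
  rw [allEq_eq_all, pairsAt_natCast, List.all_map, List.all_eq_true]
  constructor
  · intro h t ht
    have := h t (by simpa using ht)
    simpa [pairF, eqAt] using this
  · intro h t ht
    have := h t (by simpa using ht)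
    simpa [pairF, eqAt] using this

-- Step 2: get_cands is a filter of the range
theorem get_cands_eq (cs : List Char) :
    get_cands cs =
      (PySem.List.pyRange 1 (cs.length : Int) 1).filter (fun j => allEq (pairsAt cs j)) := by
  unfold get_cands
  rw [PySem.List.foldl_if_eq_foldl_filter]
  rw [show (PySem.Set.empty : PySem.Set Int) = [] from rfl, ← PySem.Set.ofList_eq_foldl]
  exact PySem.Set.ofList_eq_self_of_nodup _
    ((PySem.List.nodup_pyRange_one _ _).filter _)

theorem mem_get_cands (cs : List Char) (x : Int) :
    x ∈ get_cands cs ↔ ∃ j : Nat, x = (j : Int) ∧ isRefl cs j := by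
  rw [get_cands_eq]
  simp only [List.mem_filter, PySem.List.mem_pyRange_one]
  constructor
  · rintro ⟨⟨h1, h2⟩, hall⟩
    refine ⟨x.toNat, (Int.toNat_of_nonneg (by omega)).symm, ?_⟩
    have hx : x = ((x.toNat : Nat) : Int) := (Int.toNat_of_nonneg (by omega)).symm
    rw [hx] at hall
    refine ⟨by omega, by omega, (allEq_pairs_iff cs x.toNat).mp hall⟩
  · rintro ⟨j, rfl, h1, h2, hall⟩
    exact ⟨⟨by exact_mod_cast h1, by exact_mod_cast h2⟩, (allEq_pairs_iff cs j).mpr hall⟩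

-- Step 3: membership through the add-all fold
theorem mem_foldl_add_id (g : List Int) (s : PySem.Set Int) (y : Int) :
    y ∈ g.foldl (fun s c => PySem.Set.add s c) s ↔ y ∈ s ∨ y ∈ g := by
  induction g generalizing s with
  | nil => simp
  | cons c g ih => simp [List.foldl_cons, ih, PySem.Set.mem_add]; tauto

theorem nodup_foldl_add_id (g : List Int) (s : PySem.Set Int) (h : s.Nodup) :
    (g.foldl (fun s c => PySem.Set.add s c) s).Nodup := by
  induction g generalizing s with
  | nil => simpa
  | cons c g ih => exact ih _ (PySem.Set.nodup_add _ _ h)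

theorem mem_foldl_addAll (l : List Int) (g : Int → PySem.Set Int) (s : PySem.Set Int)
    (y : Int) :
    y ∈ l.foldl (fun s j => (g j).foldl (fun s c => PySem.Set.add s c) s) s ↔
      y ∈ s ∨ ∃ j ∈ l, y ∈ g j := by
  induction l generalizing s with
  | nil => simp
  | cons a l ih => simp [List.foldl_cons, ih, mem_foldl_add_id]; tauto

theorem nodup_foldl_addAll (l : List Int) (g : Int → PySem.Set Int) (s : PySem.Set Int)
    (h : s.Nodup) :
    (l.foldl (fun s j => (g j).foldl (fun s c => PySem.Set.add s c) s) s).Nodup := by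
  induction l generalizing s with
  | nil => simpa
  | cons a l ih => exact ih _ (nodup_foldl_add_id _ _ h)

theorem mem_smLine (cs : List Char) (x : Int) :
    x ∈ smLine cs ↔
      ∃ k : Int, k ∈ PySem.List.pyRange 0 (cs.length : Int) 1 ∧ x ∈ get_cands (flipAt cs k) := by
  unfold smLine
  rw [mem_foldl_addAll]
  simp only [show (PySem.Set.empty : PySem.Set Int) = [] from rfl, List.not_mem_nil, false_or]

theorem nodup_smLine (cs : List Char) : (smLine cs).Nodup := by
  exact nodup_foldl_addAll _ _ _ List.nodup_nil

-- Step 4: the flipped line is a List.set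
theorem flipAt_eq_set (cs : List Char) (k : Nat) (hk : k < cs.length) :
    flipAt cs (k : Int) = cs.set k (flipC (cs.getD k ' ')) := by
  unfold flipAt
  rw [List.set_eq_take_cons_drop _ hk,
    show ((k : Int) + 1) = (((k + 1 : Nat)) : Int) by push_cast; ring,
    PySem.List.slice_from_natCast, PySem.List.pyGetD_natCast]
  have hpfx : PySem.List.slice cs (some (0 : Int)) (some (k : Int)) = cs.take k := by
    rw [show (0 : Int) = ((0 : Nat) : Int) by rfl, PySem.List.slice_natCast]
    simp
  rw [hpfx]
  simp [flipC, beq_iff_eq]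

theorem getD_set_char (cs : List Char) (k m : Nat) (v : Char) :
    (cs.set k v).getD m ' ' = if m = k ∧ k < cs.length then v else cs.getD m ' ' := by
  simp only [List.getD_eq_getElem?_getD, List.getElem?_set]
  split_ifs with h1 h2 h3 h3 <;> simp_all

-- helper facts about badT
theorem badT_eq_nil_iff (cs : List Char) (j : Nat) :
    badT cs j = [] ↔ ∀ t < winW cs j, eqAt cs j t := by
  simp [badT, List.filter_eq_nil_iff, eqAt]

theorem filter_eq_singleton_of {α : Type} (l : List α) (p : α → Bool) (t₀ : α)
    (hnd : l.Nodup) (hmem : t₀ ∈ l) (h : ∀ x ∈ l, p x = true ↔ x = t₀) : l.filter p = [t₀] := by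
  induction l with
  | nil => cases hmem
  | cons a l ih =>
    by_cases hat : a = t₀
    · subst hat
      rw [List.filter_cons_of_pos ((h a (by simp)).mpr rfl)]
      have hnil : l.filter p = [] := by
        rw [List.filter_eq_nil_iff]
        intro x hx hpx
        exact (List.nodup_cons.mp hnd).1 (((h x (by simp [hx])).mp hpx) ▸ hx)
      rw [hnil]
    · have hm : t₀ ∈ l := by
        rcases List.mem_cons.mp hmem with h' | h'
        · exact absurd h'.symm hat
        · exact h'
      have hpa : ¬ p a = true := fun hpa => hat ((h a (by simp)).mp hpa)
      rw [List.filter_cons_of_neg (by simpa using hpa)]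
      exact ih (List.nodup_cons.mp hnd).2 hm (fun x hx => h x (by simp [hx]))

theorem badT_eq_singleton_iff (cs : List Char) (j t₀ : Nat) :
    badT cs j = [t₀] ↔ t₀ < winW cs j ∧ ¬ eqAt cs j t₀ ∧ ∀ t < winW cs j, t ≠ t₀ → eqAt cs j t := by
  constructor
  · intro h
    have ht₀ : t₀ ∈ badT cs j := by rw [h]; simp
    have hm := List.mem_filter.mp ht₀
    refine ⟨by simpa using hm.1, by simpa using hm.2, ?_⟩
    intro t ht hne
    by_contra hbad
    have : t ∈ badT cs j := List.mem_filter.mpr ⟨by simpa using ht, by simpa using hbad⟩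
    rw [h] at this
    simp at this
    exact hne this
  · rintro ⟨h1, h2, h3⟩
    exact filter_eq_singleton_of _ _ _ List.nodup_range (by simpa using h1)
      (by
        intro x hx
        simp only [List.mem_range] at hx
        constructor
        · intro hpx
          by_contra hne
          exact (by simpa using hpx : ¬ eqAt cs j x) (h3 x hx hne)
        · rintro rfl
          simpa using h2)

theorem eq_singleton_headD_of_length_one (l : List Nat) (h : l.length = 1) : l = [l.headD 0] := by
  match l with
  | [x] => rfl

-- Step 5: THE FLIP LEMMA — a single '.'/'#' flip fixes the reflection at j
-- exactly when at most one pair mismatches (and is fixable), with room outside the window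
theorem exists_flip_iff (cs : List Char) (j : Nat) :
    (∃ k : Nat, k < cs.length ∧ isRefl (cs.set k (flipC (cs.getD k ' '))) j) ↔ smOk cs j := by
  have hwj : winW cs j = min j (cs.length - j) := rfl
  have hwin_set : ∀ (k : Nat) (v : Char), winW (cs.set k v) j = winW cs j := by
    intro k v; simp [winW, List.length_set]
  have heq_of_ne : ∀ (k : Nat) (v : Char) (t : Nat), j - 1 - t ≠ k → j + t ≠ k →
      (eqAt (cs.set k v) j t ↔ eqAt cs j t) := by
    intro k v t h1 h2
    unfold eqAt
    rw [getD_set_char, getD_set_char, if_neg (by omega), if_neg (by omega)]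
  constructor
  · rintro ⟨k, hk, h1j, h2j, hall⟩
    have h2j' : j < cs.length := by simpa [List.length_set] using h2j
    have hall' : ∀ t < winW cs j, eqAt (cs.set k (flipC (cs.getD k ' '))) j t := by
      intro t ht; exact hall t (by rw [hwin_set]; exact ht)
    refine ⟨h1j, h2j', ?_⟩
    by_cases hout : k < j - winW cs j ∨ j + winW cs j ≤ k
    · left
      constructor
      · rw [badT_eq_nil_iff]
        intro t ht
        have h := hall' t ht
        rwa [heq_of_ne k _ t (by omega) (by omega)] at h
      · intro h2jL
        omega
    · push Not at hout
      right
      by_cases hlow : k < j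
      · set t₀ := j - 1 - k with ht₀def
        have ht₀w : t₀ < winW cs j := by omega
        have hkt : j - 1 - t₀ = k := by omega
        have hjt_ne : j + t₀ ≠ k := by omega
        have hset := hall' t₀ ht₀w
        unfold eqAt at hset
        rw [getD_set_char, getD_set_char, if_pos ⟨hkt, hk⟩, if_neg (by omega)] at hset
        have hne : ¬ eqAt cs j t₀ := by
          unfold eqAt
          rw [hkt]
          intro he
          exact flipC_ne (cs.getD k ' ') (hset.trans he.symm)
        have hoth : ∀ t < winW cs j, t ≠ t₀ → eqAt cs j t := by
          intro t ht htne
          have h := hall' t ht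
          rwa [heq_of_ne k _ t (by omega) (by omega)] at h
        have hb : badT cs j = [t₀] := (badT_eq_singleton_iff cs j t₀).mpr ⟨ht₀w, hne, hoth⟩
        rw [hb]
        refine ⟨rfl, ?_⟩
        simp only [List.headD_cons]
        left
        rw [hkt]
        simpa [flipC] using hset
      · set t₀ := k - j with ht₀def
        have ht₀w : t₀ < winW cs j := by omega
        have hkt : j + t₀ = k := by omega
        have hlow_ne : j - 1 - t₀ ≠ k := by omega
        have hset := hall' t₀ ht₀w
        unfold eqAt at hset
        rw [getD_set_char, getD_set_char, if_neg (by omega), if_pos ⟨hkt, hk⟩] at hset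
        have hne : ¬ eqAt cs j t₀ := by
          unfold eqAt
          rw [hkt]
          intro he
          exact flipC_ne (cs.getD k ' ') (hset.symm.trans he)
        have hoth : ∀ t < winW cs j, t ≠ t₀ → eqAt cs j t := by
          intro t ht htne
          have h := hall' t ht
          rwa [heq_of_ne k _ t (by omega) (by omega)] at h
        have hb : badT cs j = [t₀] := (badT_eq_singleton_iff cs j t₀).mpr ⟨ht₀w, hne, hoth⟩
        rw [hb]
        refine ⟨rfl, ?_⟩
        simp only [List.headD_cons]
        right
        rw [← hkt] at hset
        simpa [flipC] using hset.symm
  · rintro ⟨h1j, h2j, hcase⟩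
    rcases hcase with ⟨hnil, h2jlen⟩ | ⟨hlen1, hfix⟩
    · have hall := (badT_eq_nil_iff cs j).mp hnil
      by_cases hlt : 2 * j < cs.length
      · refine ⟨j + winW cs j, by omega, h1j, by simpa [List.length_set] using h2j, ?_⟩
        intro t ht
        rw [hwin_set] at ht
        rw [heq_of_ne _ _ t (by omega) (by omega)]
        exact hall t ht
      · refine ⟨0, by omega, h1j, by simpa [List.length_set] using h2j, ?_⟩
        intro t ht
        rw [hwin_set] at ht
        rw [heq_of_ne _ _ t (by omega) (by omega)]
        exact hall t ht
    · have hsing := eq_singleton_headD_of_length_one _ hlen1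
      set t₀ := (badT cs j).headD 0 with ht₀def
      obtain ⟨ht₀w, hne, hoth⟩ := (badT_eq_singleton_iff cs j t₀).mp hsing
      rcases hfix with hab | hba
      · refine ⟨j - 1 - t₀, by omega, h1j, by simpa [List.length_set] using h2j, ?_⟩
        intro t ht
        rw [hwin_set] at ht
        by_cases hte : t = t₀
        · subst hte
          unfold eqAt
          rw [getD_set_char, getD_set_char, if_pos ⟨rfl, by omega⟩, if_neg (by omega)]
          simpa [flipC] using hab
        · rw [heq_of_ne _ _ t (by omega) (by omega)]
          exact hoth t ht hte
      · refine ⟨j + t₀, by omega, h1j, by simpa [List.length_set] using h2j, ?_⟩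
        intro t ht
        rw [hwin_set] at ht
        by_cases hte : t = t₀
        · subst hte
          unfold eqAt
          rw [getD_set_char, getD_set_char, if_neg (by omega), if_pos ⟨rfl, by omega⟩]
          simpa [flipC] using hba.symm
        · rw [heq_of_ne _ _ t (by omega) (by omega)]
          exact hoth t ht hte

theorem mem_smLine_iff (cs : List Char) (x : Int) :
    x ∈ smLine cs ↔ ∃ j : Nat, x = (j : Int) ∧ smOk cs j := by
  rw [mem_smLine]
  constructor
  · rintro ⟨k, hkmem, hx⟩
    rw [PySem.List.mem_pyRange_one] at hkmem
    have hk0 : k = ((k.toNat : Nat) : Int) := (Int.toNat_of_nonneg hkmem.1).symm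
    have hklen : k.toNat < cs.length := by omega
    rw [hk0, flipAt_eq_set cs k.toNat hklen] at hx
    obtain ⟨j, rfl, hrefl⟩ := (mem_get_cands _ x).mp hx
    exact ⟨j, rfl, (exists_flip_iff cs j).mp ⟨k.toNat, hklen, hrefl⟩⟩
  · rintro ⟨j, rfl, hsm⟩
    obtain ⟨k, hk, hrefl⟩ := (exists_flip_iff cs j).mpr hsm
    refine ⟨(k : Int), by rw [PySem.List.mem_pyRange_one]; omega, ?_⟩
    rw [flipAt_eq_set cs k hk]
    exact (mem_get_cands _ _).mpr ⟨j, rfl, hrefl⟩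

-- Step 6: dictionary lookups after the build loop
theorem getD_foldl_insert_of_ne (F : String → PySem.Set Int)
    (l : List (Int × String)) (d : PySem.Dict Int (PySem.Set Int)) (q : Int)
    (h : ∀ il ∈ l, il.1 ≠ q) :
    (l.foldl (fun d il => d.insert il.1 (F il.2)) d).getD q PySem.Set.empty
      = d.getD q PySem.Set.empty := by
  induction l generalizing d with
  | nil => rfl
  | cons il l ih =>
    rw [List.foldl_cons, ih _ (fun x hx => h x (List.mem_cons_of_mem _ hx))]
    exact PySem.Dict.getD_insert_of_ne _ _ _ (Ne.symm (h il (by simp)))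

theorem getD_insertFold (F : String → PySem.Set Int) (xs : List String) (s : Int)
    (d : PySem.Dict Int (PySem.Set Int)) (k : Nat) (hk : k < xs.length) :
    ((PySem.List.enumerate xs s).foldl (fun d il => d.insert il.1 (F il.2)) d).getD
        (s + (k : Int)) PySem.Set.empty = F (xs.getD k "") := by
  induction xs generalizing s d k with
  | nil => cases hk
  | cons x xs ih =>
    rw [PySem.List.enumerate_cons, List.foldl_cons]
    cases k with
    | zero =>
      simp only [Nat.cast_zero, add_zero, List.getD_cons_zero]
      rw [getD_foldl_insert_of_ne]
      · exact PySem.Dict.getD_insert_self _ _ _ _ 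
      · intro il hil
        obtain ⟨k', hk', rfl⟩ := (PySem.List.mem_enumerate_iff _ _ _).mp hil
        simp only []
        omega
    | succ k' =>
      have hc : s + ((k' + 1 : Nat) : Int) = (s + 1) + (k' : Int) := by push_cast; ring
      rw [hc, ih _ _ _ (by simpa using Nat.lt_of_succ_lt_succ hk)]
      simp [List.getD_cons_succ]

theorem buildDicts_fst (lines : List String) (k : Nat) (hk : k < lines.length) :
    (buildDicts lines).1.getD (k : Int) PySem.Set.empty
      = get_cands (lines.getD k "").toList := by
  have hsplit : buildDicts lines =
      ((PySem.List.enumerate lines 0).foldl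
        (fun d il => d.insert il.1 (get_cands il.2.toList)) PySem.Dict.empty,
       (PySem.List.enumerate lines 0).foldl
        (fun d il => d.insert il.1 (smLine il.2.toList)) PySem.Dict.empty) := by
    unfold buildDicts
    rw [PySem.List.foldl_prod_mk
      (f := fun (d : PySem.Dict Int (PySem.Set Int)) (il : Int × String) =>
        d.insert il.1 (get_cands il.2.toList))
      (g := fun (d : PySem.Dict Int (PySem.Set Int)) (il : Int × String) =>
        d.insert il.1 (smLine il.2.toList))]
  rw [hsplit]
  simpa using getD_insertFold (fun l => get_cands l.toList) lines 0 _ k hk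

theorem buildDicts_snd (lines : List String) (k : Nat) (hk : k < lines.length) :
    (buildDicts lines).2.getD (k : Int) PySem.Set.empty
      = smLine (lines.getD k "").toList := by
  have hsplit : buildDicts lines =
      ((PySem.List.enumerate lines 0).foldl
        (fun d il => d.insert il.1 (get_cands il.2.toList)) PySem.Dict.empty,
       (PySem.List.enumerate lines 0).foldl
        (fun d il => d.insert il.1 (smLine il.2.toList)) PySem.Dict.empty) := by
    unfold buildDicts
    rw [PySem.List.foldl_prod_mk
      (f := fun (d : PySem.Dict Int (PySem.Set Int)) (il : Int × String) =>
        d.insert il.1 (get_cands il.2.toList))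
      (g := fun (d : PySem.Dict Int (PySem.Set Int)) (il : Int × String) =>
        d.insert il.1 (smLine il.2.toList))]
  rw [hsplit]
  simpa using getD_insertFold (fun l => smLine l.toList) lines 0 _ k hk

-- Step 7: membership through the intersection folds
theorem mem_foldl_inter (l : List Int) (g : Int → PySem.Set Int) (s : PySem.Set Int) (y : Int) :
    y ∈ l.foldl (fun s i => PySem.Set.inter s (g i)) s ↔ y ∈ s ∧ ∀ i ∈ l, y ∈ g i := by
  induction l generalizing s with
  | nil => simp
  | cons i l ih => simp [List.foldl_cons, ih, PySem.Set.mem_inter]; tauto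

theorem mem_foldl_inter_if (l : List Int) (i : Int) (g : Int → PySem.Set Int)
    (s : PySem.Set Int) (y : Int) :
    y ∈ l.foldl (fun r j => if j == i then r else PySem.Set.inter r (g j)) s ↔
      y ∈ s ∧ ∀ j ∈ l, j ≠ i → y ∈ g j := by
  induction l generalizing s with
  | nil => simp
  | cons j l ih =>
    simp only [List.foldl_cons]
    by_cases hj : j = i
    · subst hj
      rw [if_pos (by simp), ih]
      constructor
      · rintro ⟨hs, hall⟩
        refine ⟨hs, ?_⟩
        rintro j' hj' hne
        rcases List.mem_cons.mp hj' with rfl | hmem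
        · exact absurd rfl hne
        · exact hall j' hmem hne
      · rintro ⟨hs, hall⟩
        exact ⟨hs, fun j' hj' hne => hall j' (List.mem_cons_of_mem _ hj') hne⟩
    · rw [if_neg (by simpa using hj), ih, PySem.Set.mem_inter]
      constructor
      · rintro ⟨⟨hs, hg⟩, hall⟩
        refine ⟨hs, ?_⟩
        rintro j' hj' hne
        rcases List.mem_cons.mp hj' with rfl | hmem
        · exact hg
        · exact hall j' hmem hne
      · rintro ⟨hs, hall⟩
        exact ⟨⟨hs, hall j (by simp) hj⟩,
          fun j' hj' hne => hall j' (List.mem_cons_of_mem _ hj') hne⟩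

theorem nodup_foldl_inter_if (l : List Int) (i : Int) (g : Int → PySem.Set Int)
    (s : PySem.Set Int) (h : s.Nodup) :
    (l.foldl (fun r j => if j == i then r else PySem.Set.inter r (g j)) s).Nodup := by
  induction l generalizing s with
  | nil => simpa
  | cons j l ih =>
    simp only [List.foldl_cons]
    split
    · exact ih _ h
    · exact ih _ (PySem.Set.nodup_inter _ _ h)

theorem mem_origOf (lines : List String) (x : Int) (hne : lines ≠ []) :
    x ∈ origOf (buildDicts lines).1 (lines.length : Int) ↔
      ∀ k < lines.length, x ∈ get_cands (lines.getD k "").toList := by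
  have hlen : 0 < lines.length := List.length_pos_of_ne_nil hne
  have hb : ∀ (k : Nat), k < lines.length →
      (buildDicts lines).1.getD (k : Int) PySem.Set.empty
        = get_cands (lines.getD k "").toList := fun k hk => buildDicts_fst lines k hk
  unfold origOf
  rw [mem_foldl_inter]
  constructor
  · rintro ⟨h0, hrest⟩ k hk
    rcases Nat.eq_zero_or_pos k with rfl | hkpos
    · rw [← hb 0 hk]
      simpa using h0
    · rw [← hb k hk]
      exact hrest (k : Int) (by rw [PySem.List.mem_pyRange_one]; omega)
  · intro hall
    refine ⟨?_, ?_⟩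
    · have h0 := hall 0 hlen
      rw [show (0 : Int) = ((0 : Nat) : Int) by simp, hb 0 hlen]
      exact h0
    · intro i hi
      rw [PySem.List.mem_pyRange_one] at hi
      rw [show i = ((i.toNat : Nat) : Int) from (Int.toNat_of_nonneg (by omega)).symm,
        hb i.toNat (by omega)]
      exact hall i.toNat (by omega)

-- Step 8: membership in one row's candidate set r
theorem mem_rOf (lines : List String) (hne : lines ≠ []) (i : Nat) (hi : i < lines.length)
    (x : Int) :
    x ∈ rOf (buildDicts lines).1 (buildDicts lines).2 (lines.length : Int)
        (origOf (buildDicts lines).1 (lines.length : Int)) (i : Int) ↔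
      ∃ j : Nat, x = (j : Int) ∧ rCond lines i j := by
  unfold rOf
  rw [PySem.Set.mem_diff, mem_foldl_inter_if, buildDicts_snd lines i hi,
    mem_origOf lines x hne]
  have hmemgc : ∀ (k jn : Nat), x = (jn : Int) →
      (x ∈ get_cands (lines.getD k "").toList ↔ isRefl (lines.getD k "").toList jn) := by
    intro k jn hx
    rw [mem_get_cands]
    constructor
    · rintro ⟨j', hj', hr⟩
      have hjj : jn = j' := by omega
      rwa [hjj]
    · intro hr
      exact ⟨jn, hx, hr⟩
  constructor
  · rintro ⟨⟨hsm, hmid⟩, hnorig⟩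
    obtain ⟨jn, rfl, hsmok⟩ := (mem_smLine_iff _ x).mp hsm
    refine ⟨jn, rfl, hsmok, ?_, ?_⟩
    · intro k hk hkne
      have hx := hmid (k : Int) (by rw [PySem.List.mem_pyRange_one]; omega)
        (by exact_mod_cast hkne)
      rw [buildDicts_fst lines k hk] at hx
      exact (hmemgc k jn rfl).mp hx
    · intro hallrefl
      apply hnorig
      intro k hk
      exact (hmemgc k jn rfl).mpr (hallrefl k hk)
  · rintro ⟨jn, rfl, hsmok, hoth, hnall⟩
    refine ⟨⟨(mem_smLine_iff _ _).mpr ⟨jn, rfl, hsmok⟩, ?_⟩, ?_⟩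
    · intro jj hjj hne2
      rw [PySem.List.mem_pyRange_one] at hjj
      have hjj' : jj = ((jj.toNat : Nat) : Int) := (Int.toNat_of_nonneg (by omega)).symm
      rw [hjj', buildDicts_fst lines jj.toNat (by omega)]
      refine (hmemgc _ jn rfl).mpr (hoth jj.toNat (by omega) ?_)
      intro hcc
      apply hne2
      rw [hjj', hcc]
    · intro horig
      apply hnall
      intro k hk
      exact (hmemgc k jn rfl).mp (horig k hk)

theorem nodup_rOf (lines : List String) (i : Nat) (hi : i < lines.length) :
    (rOf (buildDicts lines).1 (buildDicts lines).2 (lines.length : Int)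
        (origOf (buildDicts lines).1 (lines.length : Int)) (i : Int)).Nodup := by
  unfold rOf
  apply PySem.Set.nodup_diff
  apply nodup_foldl_inter_if
  rw [buildDicts_snd lines i hi]
  exact nodup_smLine _

-- Step 9: uniqueness of the candidate position under Pre_p
theorem mem_mem_length_le_one {α : Type} (l : List α) (h : l.length ≤ 1) {a b : α}
    (ha : a ∈ l) (hb : b ∈ l) : a = b := by
  match l with
  | [] => cases ha
  | [x] => simp_all
  | x :: y :: t => simp at h

theorem rCond_lt (lines : List String) (i j : Nat) (h : rCond lines i j) :
    j < (lines.getD i "").toList.length := by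
  exact h.1.2.1

theorem rCond_unique (lines : List String) (f : Int) (hpre : Pre_p lines f) (i : Nat)
    (hi : i < lines.length) (j j' : Nat) (h : rCond lines i j) (h' : rCond lines i j') :
    j = j' := by
  obtain ⟨hne, hcard⟩ := hpre
  have hj : j ∈ (List.range (lines.getD i "").toList.length).filter
      (fun j => decide (rCond lines i j)) :=
    List.mem_filter.mpr ⟨List.mem_range.mpr (rCond_lt _ _ _ h), decide_eq_true h⟩
  have hj' : j' ∈ (List.range (lines.getD i "").toList.length).filter
      (fun j => decide (rCond lines i j)) :=
    List.mem_filter.mpr ⟨List.mem_range.mpr (rCond_lt _ _ _ h'), decide_eq_true h'⟩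
  exact mem_mem_length_le_one _ (hcard i hi) hj hj'

theorem rOf_shape (lines : List String) (f : Int) (hpre : Pre_p lines f) (i : Nat)
    (hi : i < lines.length) :
    rOf (buildDicts lines).1 (buildDicts lines).2 (lines.length : Int)
        (origOf (buildDicts lines).1 (lines.length : Int)) (i : Int) = [] ∨
      ∃ j : Nat, rOf (buildDicts lines).1 (buildDicts lines).2 (lines.length : Int)
          (origOf (buildDicts lines).1 (lines.length : Int)) (i : Int) = [(j : Int)] ∧
        rCond lines i j := by
  cases hro : rOf (buildDicts lines).1 (buildDicts lines).2 (lines.length : Int)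
      (origOf (buildDicts lines).1 (lines.length : Int)) (i : Int) with
  | nil => exact Or.inl rfl
  | cons x rest =>
    right
    have hx : x ∈ rOf (buildDicts lines).1 (buildDicts lines).2 (lines.length : Int)
        (origOf (buildDicts lines).1 (lines.length : Int)) (i : Int) := by
      rw [hro]; simp
    obtain ⟨j, rfl, hc⟩ := (mem_rOf lines hpre.1 i hi x).mp hx
    refine ⟨j, ?_, hc⟩
    cases rest with
    | nil => rfl
    | cons y t =>
      exfalso
      have hy : y ∈ rOf (buildDicts lines).1 (buildDicts lines).2 (lines.length : Int)
          (origOf (buildDicts lines).1 (lines.length : Int)) (i : Int) := by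
        rw [hro]; simp
      obtain ⟨j', hy', hc'⟩ := (mem_rOf lines hpre.1 i hi y).mp hy
      have hjj : j' = j := rCond_unique lines f hpre i hi j' j hc' hc
      have hnd := nodup_rOf lines i hi
      rw [hro] at hnd
      have : ((j : Nat) : Int) ∉ y :: t := (List.nodup_cons.mp hnd).1
      apply this
      rw [← hjj, ← hy']
      simp

-- Step 10: B's tests characterized
theorem reflB_iff (lk : List Char) (j : Nat) : reflB lk (j : Int) = true ↔ isRefl lk j := by
  unfold reflB isRefl
  rw [← allEq_eq_all]
  simp only [Bool.and_eq_true, decide_eq_true_eq]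
  rw [allEq_pairs_iff]
  constructor
  · rintro ⟨⟨h1, h2⟩, h3⟩
    exact ⟨by exact_mod_cast h1, by exact_mod_cast h2, h3⟩
  · rintro ⟨h1, h2, h3⟩
    exact ⟨⟨by exact_mod_cast h1, by exact_mod_cast h2⟩, h3⟩

theorem fixTest_eq_false_iff (a b : Char) :
    ((((if (a == '.') = true then '#' else '.') != b) &&
      (((if (b == '.') = true then '#' else '.') != a))) = false) ↔ fixPair a b := by
  unfold fixPair
  by_cases ha : a = '.' <;> by_cases hb : b = '.' <;> simp [ha, hb, bne] <;> tauto

theorem bCond_iff (lines : List String) (i : Nat) (hi : i < lines.length) (j : Nat) :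
    bCond lines (i : Int) (lines.getD i "").toList (j : Int) = true ↔ rCond lines i j := by
  set li := (lines.getD i "").toList with hli
  have hbadmap : (pairsAt li (j : Int)).filter (fun q => q.1 != q.2)
      = (badT li j).map (pairF li j) := by
    rw [pairsAt_natCast, List.filter_map]
    unfold badT
    have hfun : ((fun (q : Char × Char) => q.1 != q.2) ∘ pairF li j)
        = (fun t => !decide (eqAt li j t)) := by
      funext t
      simp [Function.comp_def, pairF, eqAt, bne, Bool.beq_eq_decide_eq]
    rw [hfun]
  have hallenum : (((PySem.List.enumerate lines 0).all
      (fun kl => kl.1 == (i : Int) || reflB kl.2.toList (j : Int))) = true) ↔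
      (∀ k < lines.length, k ≠ i → isRefl (lines.getD k "").toList j) := by
    rw [List.all_eq_true]
    constructor
    · intro h k hk hkne
      have h2 := h ((0 : Int) + (k : Nat), lines[k])
        ((PySem.List.mem_enumerate_iff _ _ _).mpr ⟨k, hk, rfl⟩)
      rw [Bool.or_eq_true] at h2
      rcases h2 with h2 | h2
      · exfalso
        apply hkne
        have : (0 : Int) + (k : Nat) = (i : Int) := by simpa using h2
        omega
      · rw [List.getD_eq_getElem _ _ hk]
        exact (reflB_iff _ _).mp h2
    · intro h p hp
      obtain ⟨k, hk, rfl⟩ := (PySem.List.mem_enumerate_iff _ _ _).mp hp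
      rw [Bool.or_eq_true]
      by_cases hki : k = i
      · left
        simp [hki]
      · right
        have hr := h k hk hki
        rw [List.getD_eq_getElem _ _ hk] at hr
        exact (reflB_iff _ _).mpr hr
  have hwle : winW li j = min j (li.length - j) := rfl
  simp only [bCond, hbadmap]
  set X := ((badT li j).map (pairF li j)).headD (' ', ' ') with hXdef
  by_cases hc1 : (((badT li j).map (pairF li j)).length != 1) = true
  · rw [if_pos hc1]
    have hlen : (badT li j).length ≠ 1 := by simpa using hc1
    simp only [Bool.false_eq_true, false_iff]
    rintro ⟨⟨h1j, h2j, hdisj⟩, hothers, hnall⟩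
    rcases hdisj with ⟨hnil, _⟩ | ⟨hl1, _⟩
    · apply hnall
      intro k hk
      by_cases hki : k = i
      · subst hki
        exact ⟨h1j, h2j, (badT_eq_nil_iff _ _).mp hnil⟩
      · exact hothers k hk hki
    · exact hlen hl1
  · rw [if_neg hc1]
    have hlen : (badT li j).length = 1 := by simpa using hc1
    have hsing : badT li j = [(badT li j).headD 0] := eq_singleton_headD_of_length_one _ hlen
    set t₀ := (badT li j).headD 0 with ht₀
    obtain ⟨ht₀w, hneq, hoth0⟩ := (badT_eq_singleton_iff li j t₀).mp hsing
    have hX1 : X.1 = li.getD (j - 1 - t₀) ' ' := by rw [hXdef, hsing]; rfl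
    have hX2 : X.2 = li.getD (j + t₀) ' ' := by rw [hXdef, hsing]; rfl
    by_cases hc2 : (((if X.1 == '.' then '#' else '.') != X.2) &&
        ((if X.2 == '.' then '#' else '.') != X.1)) = true
    · rw [if_pos hc2]
      have hnofix : ¬ fixPair (li.getD (j - 1 - t₀) ' ') (li.getD (j + t₀) ' ') := by
        intro hf
        rw [← hX1, ← hX2] at hf
        rw [(fixTest_eq_false_iff X.1 X.2).mpr hf] at hc2
        exact Bool.false_ne_true hc2
      simp only [Bool.false_eq_true, false_iff]
      rintro ⟨⟨h1j, h2j, hdisj⟩, _, _⟩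
      rcases hdisj with ⟨hnil, _⟩ | ⟨_, hfx⟩
      · rw [hnil] at hlen
        simp at hlen
      · exact hnofix hfx
    · rw [if_neg hc2]
      have hfix : fixPair (li.getD (j - 1 - t₀) ' ') (li.getD (j + t₀) ' ') := by
        have h2f : (((if X.1 == '.' then '#' else '.') != X.2) &&
            ((if X.2 == '.' then '#' else '.') != X.1)) = false := by
          simpa using hc2
        have hfx := (fixTest_eq_false_iff X.1 X.2).mp h2f
        rwa [hX1, hX2] at hfx
      rw [hallenum]
      constructor
      · intro hothers
        have h1j : 1 ≤ j := by omega
        have h2j : j < li.length := by omega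
        refine ⟨⟨h1j, h2j, Or.inr ⟨hlen, hfix⟩⟩, hothers, ?_⟩
        intro hall
        exact hneq ((hall i hi).2.2 t₀ ht₀w)
      · rintro ⟨_, hothers, _⟩
        exact hothers

theorem bInner_eq_find? (lines : List String) (i : Int) (li : List Char) (f : Int)
    (js : List Int) :
    bInner lines i li f js = (js.find? (bCond lines i li)).map (· * f) := by
  induction js with
  | nil => rfl
  | cons j js ih =>
    simp only [bInner, List.find?_cons]
    by_cases h : bCond lines i li j = true <;> simp [h, ih]

theorem find?_eq_some_of_unique {α : Type} (l : List α) (p : α → Bool) (x : α) (hx : x ∈ l)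
    (hp : p x = true) (hu : ∀ y ∈ l, p y = true → y = x) : l.find? p = some x := by
  induction l with
  | nil => cases hx
  | cons a l ih =>
    by_cases hpa : p a = true
    · have hax : a = x := hu a (by simp) hpa
      subst hax
      simp [List.find?_cons, hpa]
    · have hax : a ≠ x := fun e => hpa (e ▸ hp)
      have hx' : x ∈ l := by
        rcases List.mem_cons.mp hx with rfl | h
        · exact absurd hp hpa
        · exact h
      simp [List.find?_cons, hpa]
      exact ih hx' (fun y hy hpy => hu y (by simp [hy]) hpy)

-- Step 11: the search loops agree
theorem mainLoop (lines : List String) (f : Int) (hpre : Pre_p lines f) :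
    ∀ (k i : Nat), lines.length - i = k → i ≤ lines.length →
      (let r := searchLoop (buildDicts lines).1 (buildDicts lines).2 (lines.length : Int)
          (origOf (buildDicts lines).1 (lines.length : Int))
          (PySem.List.pyRange (i : Int) (lines.length : Int) 1) PySem.Set.empty
       if r.isEmpty then 0 else r.headD 0 * f) =
        bOuter lines f ((PySem.List.enumerate lines 0).drop i) := by
  intro k
  induction k with
  | zero =>
    intro i hki hle
    have hin : i = lines.length := by omega
    subst hin
    rw [PySem.List.pyRange_one_eq_nil (le_refl _),
      List.drop_eq_nil_of_le (by simp [PySem.List.length_enumerate])]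
    simp [searchLoop, bOuter]
  | succ k ih =>
    intro i hki hle
    have hi : i < lines.length := by omega
    have hcons : PySem.List.pyRange (i : Int) (lines.length : Int) 1
        = (i : Int) :: PySem.List.pyRange ((i : Int) + 1) (lines.length : Int) 1 :=
      PySem.List.pyRange_one_cons (by exact_mod_cast hi)
    have hdrops : ((PySem.List.enumerate lines 0).drop i)
        = ((0 : Int) + (i : Nat), lines[i]) :: (PySem.List.enumerate lines 0).drop (i + 1) := by
      rw [List.drop_eq_getElem_cons (by simpa [PySem.List.length_enumerate] using hi)]
      congr 1
      simp [PySem.List.getElem_enumerate]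
    have hgd : lines[i] = lines.getD i "" := (List.getD_eq_getElem _ _ hi).symm
    rw [hcons, hdrops]
    simp only [searchLoop, bOuter]
    rcases rOf_shape lines f hpre i hi with hro | ⟨jn, hro, hc⟩
    · rw [hro]
      simp only [List.isEmpty_nil, if_true]
      have hfind : (PySem.List.pyRange 1 (lines[i].toList.length : Int) 1).find?
          (bCond lines ((0 : Int) + (i : Nat)) lines[i].toList) = none := by
        rw [List.find?_eq_none]
        intro y hy hby
        rw [PySem.List.mem_pyRange_one] at hy
        rw [show y = ((y.toNat : Nat) : Int) from (Int.toNat_of_nonneg (by omega)).symm,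
          hgd, show ((0 : Int) + (i : Nat)) = ((i : Nat) : Int) by ring] at hby
        have hrc : rCond lines i y.toNat := (bCond_iff lines i hi y.toNat).mp hby
        have hmem : ((y.toNat : Nat) : Int) ∈ rOf (buildDicts lines).1 (buildDicts lines).2
            (lines.length : Int) (origOf (buildDicts lines).1 (lines.length : Int)) (i : Int) :=
          (mem_rOf lines hpre.1 i hi _).mpr ⟨y.toNat, rfl, hrc⟩
        rw [hro] at hmem
        cases hmem
      rw [bInner_eq_find?, hfind]
      simp only [Option.map_none]
      have hih := ih (i + 1) (by omega) (by omega)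
      rw [show ((i : Int) + 1) = (((i + 1 : Nat)) : Int) by push_cast; ring]
      exact hih
    · rw [hro]
      simp only [List.isEmpty_cons, Bool.false_eq_true, if_false]
      have hlt := rCond_lt lines i jn hc
      have hfind : (PySem.List.pyRange 1 (lines[i].toList.length : Int) 1).find?
          (bCond lines ((0 : Int) + (i : Nat)) lines[i].toList) = some ((jn : Nat) : Int) := by
        apply find?_eq_some_of_unique
        · rw [PySem.List.mem_pyRange_one]
          have h1 : 1 ≤ jn := hc.1.1
          have h2 : jn < (lines.getD i "").toList.length := hc.1.2.1
          rw [hgd]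
          omega
        · rw [hgd, show ((0 : Int) + (i : Nat)) = ((i : Nat) : Int) by ring]
          exact (bCond_iff lines i hi jn).mpr hc
        · intro y hy hby
          rw [PySem.List.mem_pyRange_one] at hy
          rw [show y = ((y.toNat : Nat) : Int) from (Int.toNat_of_nonneg (by omega)).symm,
            hgd, show ((0 : Int) + (i : Nat)) = ((i : Nat) : Int) by ring] at hby
          have hrc : rCond lines i y.toNat := (bCond_iff lines i hi y.toNat).mp hby
          have hun : y.toNat = jn := rCond_unique lines f hpre i hi _ _ hrc hc
          omega
      rw [bInner_eq_find?, hfind]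
      simp

-- ===== VERDICT (by name: the statement is the Claim_ definition above) =====
theorem p_spec : Claim_equal_p := by
  intro lines f _ hpre
  unfold Spec_p p p_alt
  simpa using mainLoop lines f hpre lines.length 0 (by omega) (by omega)
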